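-- pv_equiv track=rewrite | github.com/patchangg/LeetCode | Python/Medium/2126.py | asteroidsDestroyed
-- ===== SOURCE A (Python) =====
-- def asteroidsDestroyed(mass, asteroids):
--     asteroids = sorted(asteroids)
--     for asteroid in asteroids:
--         if asteroid > mass:
--             return False
--         else:
--             mass += asteroid
--     return True
-- ===== SOURCE B (Python) =====
-- def asteroidsDestroyed(mass, asteroids):
--     # Compute the minimal initial mass needed to absorb everything, by a
--     # backward pass from the largest asteroid down; then compare once.
--     # Invariant: to absorb a then the rest, you need max(a, need_rest - a).
--     need = None
--     for a in sorted(asteroids, reverse=True):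
--         need = a if need is None else max(a, need - a)
--     return need is None or mass >= need
-- ===== Notes on version B (the rewrite author's own statement) =====
-- stated objective: alternative
-- what changed: Instead of simulating the absorption forward with a running mass and early exit, B computes the minimal initial mass required (a backward fold from the largest asteroid: need = max(a, need - a)) and compares the given mass against it once.
import Mathlib
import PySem

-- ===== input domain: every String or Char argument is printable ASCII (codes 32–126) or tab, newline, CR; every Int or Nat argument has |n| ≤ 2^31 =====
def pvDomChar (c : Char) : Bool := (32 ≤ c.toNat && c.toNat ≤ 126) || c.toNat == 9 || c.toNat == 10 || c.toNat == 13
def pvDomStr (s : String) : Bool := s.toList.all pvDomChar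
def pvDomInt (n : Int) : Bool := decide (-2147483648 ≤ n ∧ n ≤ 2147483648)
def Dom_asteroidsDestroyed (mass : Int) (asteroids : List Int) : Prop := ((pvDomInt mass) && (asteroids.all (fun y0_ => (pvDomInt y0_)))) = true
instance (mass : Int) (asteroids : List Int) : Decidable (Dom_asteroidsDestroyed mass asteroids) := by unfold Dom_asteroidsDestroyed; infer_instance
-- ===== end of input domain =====

-- B replaces A's forward simulation (running mass, early exit) by a backward fold computing the minimal initial mass required, compared once (alternative decomposition, same cost).


-- ===== PORT A =====
-- A's for-loop with early return, as structural recursion over the sorted list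
def pvLoopA (mass : Int) : List Int → Bool
  | [] => true
  | a :: rest => if a > mass then false else pvLoopA (mass + a) rest

def asteroidsDestroyed (mass : Int) (asteroids : List Int) : Bool :=
  pvLoopA mass (PySem.List.sorted asteroids (fun x => x) false)

-- ===== PORT B =====
-- one step of B's loop: need = a if need is None else max(a, need - a)
def pvStepB (need : Option Int) (a : Int) : Option Int :=
  some (match need with | none => a | some n => max a (n - a))

def asteroidsDestroyed_alt (mass : Int) (asteroids : List Int) : Bool :=
  let need := (PySem.List.sorted asteroids (fun x => x) true).foldl pvStepB none
  match need with
  | none => true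
  | some n => decide (mass ≥ n)

-- ===== PRECONDITION & SPEC =====
def Spec_asteroidsDestroyed (mass : Int) (asteroids : List Int) (out : Bool) : Prop := out = asteroidsDestroyed_alt mass asteroids
instance (mass : Int) (asteroids : List Int) (out : Bool) : Decidable (Spec_asteroidsDestroyed mass asteroids out) := by unfold Spec_asteroidsDestroyed; infer_instance

-- ===== CLAIM (what is proved, stated in full; the proofs are below) =====
def Claim_equal_asteroidsDestroyed : Prop := ∀ (mass : Int) (asteroids : List Int), Dom_asteroidsDestroyed mass asteroids → Spec_asteroidsDestroyed mass asteroids (asteroidsDestroyed mass asteroids)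

-- ===== LEMMAS AND PROOFS =====
-- A's forward loop over any list equals B's backward requirement fold on the same list
theorem pvLoopA_eq_need (xs : List Int) : ∀ (mass : Int),
    pvLoopA mass xs =
      (match xs.foldr (fun a o => pvStepB o a) none with
       | none => true
       | some n => decide (mass ≥ n)) := by
  induction xs with
  | nil => intro mass; rfl
  | cons a rest ih =>
    intro mass
    simp only [List.foldr_cons, pvLoopA, ih (mass + a)]
    cases hr : rest.foldr (fun a o => pvStepB o a) none <;>
      by_cases h : a > mass <;>
      simp [pvStepB, h, ge_iff_le] <;> omega

-- the descending sort is the reverse of the ascending one (Int values, identity key)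
theorem pv_sorted_rev_eq_reverse (xs : List Int) :
    PySem.List.sorted xs (fun x => x) true = (PySem.List.sorted xs (fun x => x) false).reverse := by
  refine List.Perm.eq_of_pairwise (le := fun a b : Int => b ≤ a)
    (fun a b _ _ h1 h2 => le_antisymm h2 h1)
    (PySem.List.sorted_pairwise_rev xs (fun x => x))
    (List.pairwise_reverse.mpr (PySem.List.sorted_pairwise xs (fun x => x)))
    ((PySem.List.sorted_perm xs (fun x => x) true).trans
      ((PySem.List.sorted_perm xs (fun x => x) false).symm.trans
        (List.reverse_perm _).symm))

-- ===== VERDICT (by name: the statement is the Claim_ definition above) =====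
theorem asteroidsDestroyed_spec : Claim_equal_asteroidsDestroyed := by
  intro mass asteroids _
  unfold Spec_asteroidsDestroyed asteroidsDestroyed asteroidsDestroyed_alt
  rw [pv_sorted_rev_eq_reverse, List.foldl_reverse]
  exact pvLoopA_eq_need _ mass
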